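-- pv_equiv track=rewrite | github.com/tuffix77/informatika | лабораторная работа 3/поиск общих иучастников.py | find_common_participants
-- ===== SOURCE A (Python) =====
-- def find_common_participants(group1, group2, separator=','): # определяем функцию по 3 параметрам
--
--     list1 = [name.strip() for name in group1.split(separator)] # получаем список фамилий 1 группы
--
--
--     list2 = [name.strip() for name in group2.split(separator)] # то же самое со 2 группой
--
--     # преобразуем в множэество
--
--     set1 = set(list1)
--     set2 = set(list2)
--
--
--     common_set = set1 & set2     # ищем совпадения
--
--
--     common_list = list(common_set)   # преобразуем обратно в список
--
--
--     common_list.sort()   # сортируем по алфавиту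
--
--
--     return common_list   # возвращаем отсортированный список
-- ===== SOURCE B (Python) =====
-- def find_common_participants(group1, group2, separator=','):
--     # One pass over the sorted first group: emit a name when it occurs in group2
--     # and differs from the last emitted name (dedupe during the scan),
--     # so the result is already sorted and unique -- no set intersection, no final sort.
--     names2 = set(name.strip() for name in group2.split(separator))
--     result = []
--     for name in sorted(name.strip() for name in group1.split(separator)):
--         if name in names2 and (not result or result[-1] != name):
--             result.append(name)
--     return result
-- ===== Notes on version B (the rewrite author's own statement) =====
-- stated objective: alternative
-- what changed: Replaces building two sets and intersecting then sorting by a single scan of the sorted first group that filters by membership in group2 and dedupes against the last emitted name.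
import Mathlib
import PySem

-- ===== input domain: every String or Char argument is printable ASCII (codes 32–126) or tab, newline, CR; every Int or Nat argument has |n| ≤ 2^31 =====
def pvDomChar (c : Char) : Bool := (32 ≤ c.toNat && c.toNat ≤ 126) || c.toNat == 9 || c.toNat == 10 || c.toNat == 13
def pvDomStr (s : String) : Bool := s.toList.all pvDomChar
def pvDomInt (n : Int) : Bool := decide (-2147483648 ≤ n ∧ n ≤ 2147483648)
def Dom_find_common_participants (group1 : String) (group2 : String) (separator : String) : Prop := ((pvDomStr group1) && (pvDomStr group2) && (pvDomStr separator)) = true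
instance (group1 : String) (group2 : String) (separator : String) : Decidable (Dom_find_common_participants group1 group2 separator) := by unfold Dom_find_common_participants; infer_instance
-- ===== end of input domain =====

-- B replaces set-intersect-then-sort by one dedupe-filter scan of the sorted first group (alternative decomposition, similar cost).

-- ===== PORT A =====
-- group.split(separator): PySem.Str.split? is none only for separator = "" (ValueError, outside Pre_); .getD [] makes it total.
def find_common_participants (group1 : String) (group2 : String) (separator : String) : List String :=
  let list1 := ((PySem.Str.split? group1 separator).getD []).map PySem.Str.strip
  let list2 := ((PySem.Str.split? group2 separator).getD []).map PySem.Str.strip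
  let set1 := PySem.Set.ofList list1
  let set2 := PySem.Set.ofList list2
  let common_set := PySem.Set.inter set1 set2
  PySem.List.sorted common_set (fun x => x) false

-- ===== PORT B =====
-- 'name in names2 and (not result or result[-1] != name)': 'result[-1] != name unless result
-- is empty' is exactly 'result.getLast?.all (· ≠ name)'.  split as in port A.
def find_common_participants_alt (group1 : String) (group2 : String) (separator : String) : List String :=
  let names2 := PySem.Set.ofList (((PySem.Str.split? group2 separator).getD []).map PySem.Str.strip)
  let sorted1 := PySem.List.sorted (((PySem.Str.split? group1 separator).getD []).map PySem.Str.strip) (fun x => x) false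
  sorted1.foldl
    (fun result name =>
      if PySem.Set.contains names2 name && (result.getLast?.all (fun l => decide (l ≠ name))) then
        result ++ [name]
      else result) []

-- ===== PRECONDITION & SPEC =====
-- Python's str.split raises ValueError when the separator is the empty string (both A and B raise there).
def Pre_find_common_participants (group1 : String) (group2 : String) (separator : String) : Prop := separator ≠ ""
instance (group1 : String) (group2 : String) (separator : String) : Decidable (Pre_find_common_participants group1 group2 separator) := by unfold Pre_find_common_participants; infer_instance
def pvWitness_find_common_participants : String × String × String := ("Ivanov, Petrov", "Petrov, Sidorov", ",")
def Spec_find_common_participants (group1 : String) (group2 : String) (separator : String) (out : List String) : Prop := out = find_common_participants_alt group1 group2 separator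
instance (group1 : String) (group2 : String) (separator : String) (out : List String) : Decidable (Spec_find_common_participants group1 group2 separator out) := by unfold Spec_find_common_participants; infer_instance

-- ===== CLAIM (what is proved, stated in full; the proofs are below) =====
def Claim_equal_find_common_participants : Prop := ∀ (group1 : String) (group2 : String) (separator : String), Dom_find_common_participants group1 group2 separator → Pre_find_common_participants group1 group2 separator → Spec_find_common_participants group1 group2 separator (find_common_participants group1 group2 separator)

-- ===== LEMMAS AND PROOFS =====

-- every element of a strictly sorted list is ≤ its last element
theorem pv_le_getLast : ∀ (l : List String), l.Pairwise (· < ·) → ∀ (a x : String),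
    a ∈ l → l.getLast? = some x → a ≤ x := by
  intro l
  induction l with
  | nil => intro _ a x ha _; cases ha
  | cons b t ih =>
    intro h a x ha hx
    rcases List.pairwise_cons.mp h with ⟨hb, ht⟩
    cases t with
    | nil =>
      simp only [List.getLast?_singleton, Option.some.injEq] at hx
      simp only [List.mem_singleton] at ha
      simp [ha, hx]
    | cons c u =>
      rw [List.getLast?_cons_cons] at hx
      rcases List.mem_cons.mp ha with rfl | ha
      · exact le_of_lt (lt_of_lt_of_le (hb c (by simp)) (ih ht c x (by simp) hx))
      · exact ih ht a x ha hx

-- the dedupe-filter loop of B: strictly sorted output, membership = filter by t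
theorem pv_loop_invariant (t : List String) :
    ∀ (xs acc : List String), xs.Pairwise (· ≤ ·) → acc.Pairwise (· < ·) →
    (∀ a ∈ acc, ∀ y ∈ xs, a ≤ y) →
    (xs.foldl (fun result name =>
        if PySem.Set.contains t name && (result.getLast?.all (fun l => decide (l ≠ name))) then
          result ++ [name]
        else result) acc).Pairwise (· < ·) ∧
    (∀ z, z ∈ xs.foldl (fun result name =>
        if PySem.Set.contains t name && (result.getLast?.all (fun l => decide (l ≠ name))) then
          result ++ [name]
        else result) acc ↔ z ∈ acc ∨ (z ∈ xs ∧ z ∈ t)) := by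
  intro xs
  induction xs with
  | nil => intro acc _ hacc _; simpa using hacc
  | cons x xs ih =>
    intro acc hxs hacc hle
    rcases List.pairwise_cons.mp hxs with ⟨hx, hxs'⟩
    simp only [List.foldl_cons]
    by_cases hc1 : PySem.Set.contains t x = true
    · by_cases hc2 : (acc.getLast?.all (fun l => decide (l ≠ x))) = true
      · rw [if_pos (by rw [hc1, hc2]; rfl)]
        have hxt : x ∈ t := (PySem.Set.contains_iff t x).mp hc1
        have haccx : ∀ a ∈ acc, a < x := by
          intro a ha
          have h1 : a ≤ x := hle a ha x (by simp)
          rcases lt_or_eq_of_le h1 with h | h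
          · exact h
          · exfalso
            subst h
            cases hL : acc.getLast? with
            | none => simp [List.getLast?_eq_none_iff.mp hL] at ha
            | some l =>
              have hlm : l ∈ acc := List.mem_of_getLast? hL
              have hla : l ≤ a := hle l hlm a (by simp)
              have hal : a ≤ l := pv_le_getLast acc hacc a l ha hL
              have : l = a := le_antisymm hla hal
              rw [hL] at hc2
              simp [this] at hc2
        have hacc' : (acc ++ [x]).Pairwise (· < ·) := by
          rw [List.pairwise_append]
          exact ⟨hacc, by simp, by simpa using haccx⟩
        have hle' : ∀ a ∈ acc ++ [x], ∀ y ∈ xs, a ≤ y := by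
          intro a ha y hy
          rcases List.mem_append.mp ha with ha | ha
          · exact hle a ha y (by simp [hy])
          · simp only [List.mem_singleton] at ha; subst ha; exact hx y hy
        rcases ih (acc ++ [x]) hxs' hacc' hle' with ⟨hp, hm⟩
        refine ⟨hp, fun z => ?_⟩
        rw [hm z]
        simp only [List.mem_append, List.mem_cons, List.not_mem_nil, or_false]
        constructor
        · rintro (⟨h | h⟩ | ⟨h1, h2⟩)
          · exact Or.inl h
          · exact Or.inr ⟨Or.inl h, h ▸ hxt⟩
          · exact Or.inr ⟨Or.inr h1, h2⟩
        · rintro (h | ⟨h1 | h1, h2⟩)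
          · exact Or.inl (Or.inl h)
          · exact Or.inl (Or.inr h1)
          · exact Or.inr ⟨h1, h2⟩
      · rw [if_neg (by rw [Bool.and_eq_true]; exact fun h => hc2 h.2)]
        rcases ih acc hxs' hacc (fun a ha y hy => hle a ha y (by simp [hy])) with ⟨hp, hm⟩
        refine ⟨hp, fun z => ?_⟩
        rw [hm z]
        simp only [List.mem_cons]
        constructor
        · rintro (h | ⟨h1, h2⟩)
          · exact Or.inl h
          · exact Or.inr ⟨Or.inr h1, h2⟩
        · rintro (h | ⟨h1 | h1, h2⟩)
          · exact Or.inl h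
          · -- z = x but the last kept name equals x, so x is already in acc
            subst h1
            cases hL : acc.getLast? with
            | none => rw [hL] at hc2; simp at hc2
            | some l =>
              rw [hL] at hc2
              simp only [Option.all_some, decide_eq_true_eq] at hc2
              rw [not_not] at hc2
              exact Or.inl (hc2 ▸ List.mem_of_getLast? hL)
          · exact Or.inr ⟨h1, h2⟩
    · rw [if_neg (by rw [Bool.and_eq_true]; exact fun h => hc1 h.1)]
      rcases ih acc hxs' hacc (fun a ha y hy => hle a ha y (by simp [hy])) with ⟨hp, hm⟩
      refine ⟨hp, fun z => ?_⟩
      rw [hm z]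
      simp only [List.mem_cons]
      constructor
      · rintro (h | ⟨h1, h2⟩)
        · exact Or.inl h
        · exact Or.inr ⟨Or.inr h1, h2⟩
      · rintro (h | ⟨h1 | h1, h2⟩)
        · exact Or.inl h
        · subst h1; exact absurd ((PySem.Set.contains_iff t z).mpr h2) hc1
        · exact Or.inr ⟨h1, h2⟩

-- two strictly sorted lists with the same members are equal
theorem pv_eq_of_sorted_mem : ∀ (l1 l2 : List String), l1.Pairwise (· < ·) → l2.Pairwise (· < ·) →
    (∀ x, x ∈ l1 ↔ x ∈ l2) → l1 = l2 := by
  intro l1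
  induction l1 with
  | nil =>
    intro l2 _ _ hmem
    cases l2 with
    | nil => rfl
    | cons b m => exact absurd ((hmem b).mpr (by simp)) (by simp)
  | cons a l ih =>
    intro l2 h1 h2 hmem
    cases l2 with
    | nil => exact absurd ((hmem a).mp (by simp)) (by simp)
    | cons b m =>
      rcases List.pairwise_cons.mp h1 with ⟨ha, hl⟩
      rcases List.pairwise_cons.mp h2 with ⟨hb, hm⟩
      have hab : a = b := by
        rcases List.mem_cons.mp ((hmem a).mp (by simp)) with h | h
        · exact h
        · rcases List.mem_cons.mp ((hmem b).mpr (by simp)) with h' | h'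
          · exact h'.symm
          · exact absurd (lt_trans (hb a h) (ha b h')) (lt_irrefl b)
      subst hab
      congr 1
      refine ih m hl hm fun x => ⟨fun hx => ?_, fun hx => ?_⟩
      · rcases List.mem_cons.mp ((hmem x).mp (List.mem_cons_of_mem a hx)) with h | h
        · exact absurd (h ▸ ha x hx) (lt_irrefl a)
        · exact h
      · rcases List.mem_cons.mp ((hmem x).mpr (List.mem_cons_of_mem a hx)) with h | h
        · exact absurd (h ▸ hb x hx) (lt_irrefl a)
        · exact h

-- ===== VERDICT (by name: the statement is the Claim_ definition above) =====
theorem find_common_participants_spec : Claim_equal_find_common_participants := by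
  intro group1 group2 separator _ _
  unfold Spec_find_common_participants find_common_participants find_common_participants_alt
  set l1 := ((PySem.Str.split? group1 separator).getD []).map PySem.Str.strip with hl1
  set l2 := ((PySem.Str.split? group2 separator).getD []).map PySem.Str.strip with hl2
  -- A side: strictly sorted, members = l1 ∩ l2
  have hAnd : (PySem.Set.inter (PySem.Set.ofList l1) (PySem.Set.ofList l2)).Nodup :=
    PySem.Set.nodup_inter _ _ (PySem.Set.nodup_ofList _)
  have hAperm := PySem.List.sorted_perm (xs := PySem.Set.inter (PySem.Set.ofList l1) (PySem.Set.ofList l2)) (key := fun x => x) (rev := false)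
  have hAnodup : (PySem.List.sorted (PySem.Set.inter (PySem.Set.ofList l1) (PySem.Set.ofList l2)) (fun x => x) false).Nodup :=
    hAperm.nodup_iff.mpr hAnd
  have hAle := PySem.List.sorted_pairwise (xs := PySem.Set.inter (PySem.Set.ofList l1) (PySem.Set.ofList l2)) (key := fun x => x)
  have hAlt : (PySem.List.sorted (PySem.Set.inter (PySem.Set.ofList l1) (PySem.Set.ofList l2)) (fun x => x) false).Pairwise (· < ·) :=
    (hAle.and hAnodup).imp fun h => lt_of_le_of_ne h.1 h.2
  have hAmem : ∀ z, z ∈ PySem.List.sorted (PySem.Set.inter (PySem.Set.ofList l1) (PySem.Set.ofList l2)) (fun x => x) false ↔ (z ∈ l1 ∧ z ∈ l2) := by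
    intro z
    rw [PySem.List.mem_sorted, PySem.Set.mem_inter, PySem.Set.mem_ofList, PySem.Set.mem_ofList]
  -- B side: the loop invariant on the sorted first list
  have hBs := PySem.List.sorted_pairwise (xs := l1) (key := fun x => x)
  rcases pv_loop_invariant (PySem.Set.ofList l2) (PySem.List.sorted l1 (fun x => x) false) [] hBs (by simp) (by simp) with ⟨hBlt, hBmem⟩
  refine pv_eq_of_sorted_mem _ _ hAlt hBlt fun z => ?_
  rw [hAmem z, hBmem z]
  simp [PySem.List.mem_sorted, PySem.Set.mem_ofList]
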